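-- pv_equiv track=rewrite | github.com/OxQuasar/nous-memories | iching/spaceprobe/q4/round1_stems_branches.py | is_involution
-- ===== SOURCE A (Python) =====
-- TRIGRAMS = ['Kun', 'Zhen', 'Gen', 'Dui', 'Kan', 'Li', 'Xun', 'Qian']
--
-- def is_involution(pairs, universe=None):
--     """Check if pairs form a valid involution (every element paired exactly once)."""
--     if universe is None:
--         universe = set(TRIGRAMS)
--     seen = set()
--     for p in pairs:
--         for x in p:
--             if x in seen:
--                 return False
--             seen.add(x)
--     return seen == universe
-- ===== SOURCE B (Python) =====
-- TRIGRAMS = ['Kun', 'Zhen', 'Gen', 'Dui', 'Kan', 'Li', 'Xun', 'Qian']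
--
-- def is_involution(pairs, universe=None):
--     """Check if pairs form a valid involution (every element paired exactly once)."""
--     if universe is None:
--         universe = set(TRIGRAMS)
--     # Sort-and-compare: the multiset of all paired elements must be exactly
--     # the universe, each element once.  Since `universe` is a set (no
--     # duplicates), sorted(flat) == sorted(universe) holds iff the flattened
--     # elements are duplicate-free and cover the universe exactly.
--     flat = sorted(x for p in pairs for x in p)
--     return flat == sorted(universe)
-- ===== Notes on version B (the rewrite author's own statement) =====
-- stated objective: alternative
-- what changed: Replaces A's incremental hash-set duplicate scan with early return by a sort-and-compare pass: sort the flattened elements and compare the sorted list to the sorted universe, which simultaneously checks no-duplicates and exact coverage.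
import Mathlib
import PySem

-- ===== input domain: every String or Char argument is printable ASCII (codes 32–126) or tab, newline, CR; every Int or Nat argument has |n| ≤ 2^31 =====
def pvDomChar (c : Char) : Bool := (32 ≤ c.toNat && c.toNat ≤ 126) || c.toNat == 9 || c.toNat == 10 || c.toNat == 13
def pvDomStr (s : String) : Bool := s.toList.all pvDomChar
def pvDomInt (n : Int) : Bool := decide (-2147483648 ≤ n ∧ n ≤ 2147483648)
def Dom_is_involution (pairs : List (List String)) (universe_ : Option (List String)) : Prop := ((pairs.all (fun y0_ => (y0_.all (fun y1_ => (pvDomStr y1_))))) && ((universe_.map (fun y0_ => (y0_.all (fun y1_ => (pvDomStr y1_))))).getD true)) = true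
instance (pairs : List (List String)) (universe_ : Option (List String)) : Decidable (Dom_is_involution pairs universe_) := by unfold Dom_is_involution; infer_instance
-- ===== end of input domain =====

-- B replaces A's incremental seen-set loop with early return by a sort-and-compare pass (alternative algorithm; same task).


def TRIGRAMS : List String := ["Kun", "Zhen", "Gen", "Dui", "Kan", "Li", "Xun", "Qian"]

-- ===== PORT A =====
-- the inner 'for x in p' loop with its early 'return False': none = returned False, some seen = fell through
def isInvInner (p : List String) (seen : PySem.Set String) : Option (PySem.Set String) :=
  match p with
  | [] => some seen
  | x :: rest => if PySem.Set.contains seen x then none else isInvInner rest (PySem.Set.add seen x)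

-- the outer 'for p in pairs' loop
def isInvOuter (ps : List (List String)) (seen : PySem.Set String) : Option (PySem.Set String) :=
  match ps with
  | [] => some seen
  | p :: rest => match isInvInner p seen with
    | none => none
    | some seen' => isInvOuter rest seen'

def is_involution (pairs : List (List String)) (universe_ : Option (List String)) : Bool :=
  match isInvOuter pairs PySem.Set.empty with
  | none => false            -- early 'return False'
  | some seen =>
    match universe_ with
    | none => PySem.Set.equal seen (PySem.Set.ofList TRIGRAMS)  -- universe = set(TRIGRAMS)
    | some u => PySem.Set.equal seen (PySem.Set.ofList u)       -- universe is a Python set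

-- ===== PORT B =====
def is_involution_alt (pairs : List (List String)) (universe_ : Option (List String)) : Bool :=
  let uni : PySem.Set String :=
    match universe_ with
    | none => PySem.Set.ofList TRIGRAMS
    | some u => PySem.Set.ofList u                              -- universe is a Python set
  let flat : List String :=
    PySem.List.sorted (pairs.flatMap (fun p => p)) (fun x => x) false   -- sorted(x for p in pairs for x in p)
  flat == PySem.List.sorted uni (fun x => x) false              -- flat == sorted(universe)

-- ===== PRECONDITION & SPEC =====
def Spec_is_involution (pairs : List (List String)) (universe_ : Option (List String)) (out : Bool) : Prop := out = is_involution_alt pairs universe_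
instance (pairs : List (List String)) (universe_ : Option (List String)) (out : Bool) : Decidable (Spec_is_involution pairs universe_ out) := by unfold Spec_is_involution; infer_instance

-- ===== CLAIM (what is proved, stated in full; the proofs are below) =====
def Claim_equal_is_involution : Prop := ∀ (pairs : List (List String)) (universe_ : Option (List String)), Dom_is_involution pairs universe_ → Spec_is_involution pairs universe_ (is_involution pairs universe_)

-- ===== LEMMAS AND PROOFS =====

-- inner composes over concatenation
theorem isInvInner_append (a b : List String) (s : PySem.Set String) :
    isInvInner (a ++ b) s = (isInvInner a s).bind (fun t => isInvInner b t) := by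
  induction a generalizing s with
  | nil => simp [isInvInner]
  | cons x rest ih =>
    simp only [List.cons_append, isInvInner]
    split <;> simp [ih]

-- the nested loops equal one loop over the flattened list
theorem isInvOuter_eq_flat (ps : List (List String)) (s : PySem.Set String) :
    isInvOuter ps s = isInvInner (ps.flatMap (fun p => p)) s := by
  induction ps generalizing s with
  | nil => simp [isInvOuter, isInvInner]
  | cons p rest ih =>
    simp only [isInvOuter, List.flatMap_cons, isInvInner_append]
    cases h : isInvInner p s <;> simp [ih]

theorem isInvInner_some (xs : List String) (s : PySem.Set String)
    (hnd : xs.Nodup) (hdisj : ∀ x ∈ xs, x ∉ s) :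
    isInvInner xs s = some (s ++ xs) := by
  induction xs generalizing s with
  | nil => simp [isInvInner]
  | cons x rest ih =>
    have hx : x ∉ s := hdisj x (by simp)
    simp only [isInvInner]
    rw [if_neg (by simp [hx])]
    rw [PySem.Set.add_of_not_mem hx]
    rw [ih (s ++ [x]) (List.Nodup.of_cons hnd)
        (by intro y hy; simp only [List.mem_append, List.mem_singleton]
            rintro (h | rfl)
            · exact hdisj y (by simp [hy]) h
            · exact (List.nodup_cons.mp hnd).1 hy)]
    simp

theorem isInvInner_none (xs : List String) (s : PySem.Set String)
    (h : ¬ xs.Nodup ∨ ∃ x ∈ xs, x ∈ s) :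
    isInvInner xs s = none := by
  induction xs generalizing s with
  | nil =>
    rcases h with h | ⟨x, hx, _⟩
    · exact absurd List.nodup_nil h
    · simp at hx
  | cons x rest ih =>
    simp only [isInvInner]
    by_cases hc : x ∈ s
    · rw [if_pos (by simp [hc])]
    · rw [if_neg (by simp [hc])]
      apply ih
      rcases h with h | ⟨y, hy, hys⟩
      · rw [List.nodup_cons] at h
        by_cases hxr : x ∈ rest
        · exact Or.inr ⟨x, hxr, by simp [PySem.Set.mem_add]⟩
        · exact Or.inl (fun hn => h ⟨hxr, hn⟩)
      · rcases List.mem_cons.mp hy with rfl | hyr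
        · exact absurd hys hc
        · exact Or.inr ⟨y, hyr, by simp [PySem.Set.mem_add, hys]⟩

-- both sides as one Bool fact: A's loop result equals the sorted comparison, for any set S of distinct elements
theorem flat_vs_sorted (flat : List String) (S : PySem.Set String) (hS : S.Nodup) :
    (match isInvInner flat PySem.Set.empty with
      | none => false
      | some seen => PySem.Set.equal seen S)
    = (PySem.List.sorted flat (fun x => x) false == PySem.List.sorted S (fun x => x) false) := by
  have hsorted : (PySem.List.sorted flat (fun x => x) false == PySem.List.sorted S (fun x => x) false)
      = decide (flat.Perm S) := by
    by_cases hp : flat.Perm S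
    · simp [(PySem.List.sorted_id_eq_sorted_id_iff_perm _ _).mpr hp, hp]
    · have hne : PySem.List.sorted flat (fun x => x) false ≠ PySem.List.sorted S (fun x => x) false :=
        fun h => hp ((PySem.List.sorted_id_eq_sorted_id_iff_perm _ _).mp h)
      simp [hp, beq_eq_false_iff_ne.mpr hne]
  rw [hsorted]
  by_cases hnd : flat.Nodup
  · rw [isInvInner_some flat PySem.Set.empty hnd (by intro x _ hx; simp [PySem.Set.empty] at hx)]
    simp only [PySem.Set.empty, List.nil_append]
    by_cases hp : flat.Perm S
    · rw [decide_eq_true hp]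
      exact (PySem.Set.equal_iff _ _).mpr (fun x => ⟨fun hx => hp.mem_iff.mp hx, fun hx => hp.mem_iff.mpr hx⟩)
    · rw [decide_eq_false hp]
      apply (Bool.eq_false_iff).mpr
      intro heq
      exact hp ((List.perm_ext_iff_of_nodup hnd hS).mpr ((PySem.Set.equal_iff _ _).mp heq))
  · rw [isInvInner_none flat PySem.Set.empty (Or.inl hnd)]
    have : ¬ flat.Perm S := fun hp => hnd (hp.symm.nodup hS)
    simp [this]

-- ===== VERDICT (by name: the statement is the Claim_ definition above) =====
theorem is_involution_spec : Claim_equal_is_involution := by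
  intro pairs universe_ _
  unfold Spec_is_involution is_involution is_involution_alt
  rw [isInvOuter_eq_flat]
  cases universe_ with
  | none => exact flat_vs_sorted _ _ (PySem.Set.nodup_ofList TRIGRAMS)
  | some u => exact flat_vs_sorted _ _ (PySem.Set.nodup_ofList u)
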